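-- pv_equiv track=rewrite | github.com/Solidium-X/Bioinformatics_Solutions | Genome_Sequencing/stringComposition.py | kmers
-- ===== SOURCE A (Python) =====
-- def kmers(string, k):
--     '''
--
--     :param string: Single string constituting sequence.
--     :param k: Int corresponding to desired size of k-mer.
--     :return: List of k-mers
--     '''
--     result = []
--     for i in range(len(string)-k):
--         result.append(string[i:i+k])
--     if len(set(result)) == len(result):
--         return True
--     else:
--         return False
-- ===== SOURCE B (Python) =====
-- def kmers(string, k):
--     windows = [string[i:i + k] for i in range(len(string) - k)]
--     windows.sort()
--     for a, b in zip(windows, windows[1:]):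
--         if a == b:
--             return False
--     return True
-- ===== Notes on version B (the rewrite author's own statement) =====
-- stated objective: alternative
-- what changed: Replaces the set-cardinality uniqueness test with sorting the k-mer list and scanning adjacent pairs for an equal neighbour (early exit on the first duplicate).
import Mathlib
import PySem

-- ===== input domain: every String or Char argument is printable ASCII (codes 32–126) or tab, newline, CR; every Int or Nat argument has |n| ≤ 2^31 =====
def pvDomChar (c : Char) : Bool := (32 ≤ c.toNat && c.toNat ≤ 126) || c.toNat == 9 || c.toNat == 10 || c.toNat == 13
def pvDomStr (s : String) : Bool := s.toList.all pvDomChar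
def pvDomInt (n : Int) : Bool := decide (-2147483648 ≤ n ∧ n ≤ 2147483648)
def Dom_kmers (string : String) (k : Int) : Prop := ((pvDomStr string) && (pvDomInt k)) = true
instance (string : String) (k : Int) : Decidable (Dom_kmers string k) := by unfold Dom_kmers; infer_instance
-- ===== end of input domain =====

-- B replaces A's set-cardinality uniqueness test by sorting the k-mer list and
-- scanning adjacent pairs (alternative algorithm; return value is identical).

-- ===== PORT A =====
def kmers (string : String) (k : Int) : Bool :=
  let result := (PySem.List.pyRange 0 (PySem.Str.len string - k) 1).foldl
    (fun acc i => acc ++ [PySem.Str.slice string (some i) (some (i + k))]) []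
  if PySem.Set.len (PySem.Set.ofList result) = PySem.List.len result then true else false

-- ===== PORT B =====
-- the zip(windows, windows[1:]) adjacent scan with early return
def noDupAdjacent : List String → Bool
  | [] => true
  | [_] => true
  | a :: b :: t => if a == b then false else noDupAdjacent (b :: t)

def kmers_alt (string : String) (k : Int) : Bool :=
  let windows := (PySem.List.pyRange 0 (PySem.Str.len string - k) 1).map
    (fun i => PySem.Str.slice string (some i) (some (i + k)))
  noDupAdjacent (windows.mergeSort (fun a b => a ≤ b))  -- windows.sort() ported as the library sort

-- ===== PRECONDITION & SPEC =====
def Spec_kmers (string : String) (k : Int) (out : Bool) : Prop := out = kmers_alt string k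
instance (string : String) (k : Int) (out : Bool) : Decidable (Spec_kmers string k out) := by unfold Spec_kmers; infer_instance

-- ===== CLAIM (what is proved, stated in full; the proofs are below) =====
def Claim_equal_kmers : Prop := ∀ (string : String) (k : Int), Dom_kmers string k → Spec_kmers string k (kmers string k)

-- ===== LEMMAS AND PROOFS =====

theorem foldl_append_singleton {α β : Type} (f : β → α) (l : List β) (init : List α) :
    l.foldl (fun acc i => acc ++ [f i]) init = init ++ l.map f := by
  induction l generalizing init with
  | nil => simp
  | cons a t ih => simp [List.foldl, ih]

theorem ofList_length_eq_iff {α : Type} [DecidableEq α] (r : List α) :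
    (PySem.Set.ofList r).length = r.length ↔ r.Nodup := by
  have hfs : (PySem.Set.ofList r).toFinset = r.toFinset := by
    ext x
    simp [List.mem_toFinset, PySem.Set.mem_ofList]
  constructor
  · intro h
    have hc : r.toFinset.card = r.length := by
      rw [← hfs, List.toFinset_card_of_nodup (PySem.Set.nodup_ofList r), h]
    exact Multiset.toFinset_card_eq_card_iff_nodup.1 (by simpa using hc)
  · intro h
    rw [PySem.Set.ofList_eq_self_of_nodup r h]

theorem noDupAdjacent_eq (s : List String) (h : s.Pairwise (· ≤ ·)) :
    noDupAdjacent s = decide s.Nodup := by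
  induction s with
  | nil => simp [noDupAdjacent]
  | cons a t ih =>
    cases t with
    | nil => simp [noDupAdjacent]
    | cons b u =>
      have hab : a ≤ b := (List.pairwise_cons.1 h).1 b (by simp)
      have ht : (b :: u).Pairwise (· ≤ ·) := (List.pairwise_cons.1 h).2
      by_cases he : a = b
      · subst he
        simp [noDupAdjacent]
      · have hnotin : a ∉ b :: u := by
          intro hm
          rcases List.mem_cons.1 hm with h1 | h2
          · exact he h1
          · exact he (le_antisymm hab ((List.pairwise_cons.1 ht).1 a h2))
        simp [noDupAdjacent, he, ih ht, List.nodup_cons, hnotin]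

-- ===== VERDICT (by name: the statement is the Claim_ definition above) =====
theorem kmers_spec : Claim_equal_kmers := by
  intro string k _
  unfold Spec_kmers kmers kmers_alt
  rw [foldl_append_singleton]
  set r := (PySem.List.pyRange 0 (PySem.Str.len string - k) 1).map
    (fun i => PySem.Str.slice string (some i) (some (i + k))) with hr
  simp only [List.nil_append]
  have hpw : (r.mergeSort (fun a b => a ≤ b)).Pairwise (· ≤ ·) := by
    have := List.pairwise_mergeSort (le := fun a b : String => decide (a ≤ b))
      (fun a b c h1 h2 => by simp at *; exact le_trans h1 h2)
      (fun a b => by simpa using le_total a b) r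
    simpa using this
  rw [noDupAdjacent_eq _ hpw]
  by_cases hn : r.Nodup
  · simp [hn, (ofList_length_eq_iff r).2 hn]
  · have h1 : ¬ (PySem.Set.ofList r).length = r.length :=
      fun h => hn ((ofList_length_eq_iff r).1 h)
    simp [h1, hn]
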